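-- pv_equiv track=rewrite | github.com/SEunNGHYun/YSH_Algorithm | 프로그래머스/unrated/120843. 공 던지기/공 던지기.py | solution
-- ===== SOURCE A (Python) =====
-- def solution(numbers, k):
--     leng = len(numbers)
--     i = 0
--     if leng % 2 == 0:
--         k -= 1
--         while k > 0:
--             k -= 1
--             i += 2
--             if i == leng:
--                 i = 0
--     else:
--         while k > 1:
--             k -= 1
--             i += 2
--             if i == leng :
--                 i = 0
--             elif i == leng + 1:
--                 i = 1
--     return numbers[i]
-- ===== SOURCE B (Python) =====
-- def solution(numbers, k):
--     return numbers[(2 * (k - 1)) % len(numbers)]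
-- ===== Notes on version B (the rewrite author's own statement) =====
-- stated objective: faster
-- what changed: replaced A's step-by-step O(k) wrap-around walk of the ring with the closed-form index numbers[(2*(k-1)) % len(numbers)]
-- outside the precondition, e.g. on solution([1, 2, 3], 0): A returns 1, B returns 2; on solution([], 1): A raises IndexError, B raises ZeroDivisionError; on solution([5], 2): A raises IndexError, B returns 5
-- crash fix: On singleton lists with k >= 2 A's odd-length loop drives the index past the end and numbers[i] raises IndexError, while B returns numbers[0] (the only ball holder). — e.g. on solution([5], 2): A raises IndexError, B returns 5
import Mathlib
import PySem

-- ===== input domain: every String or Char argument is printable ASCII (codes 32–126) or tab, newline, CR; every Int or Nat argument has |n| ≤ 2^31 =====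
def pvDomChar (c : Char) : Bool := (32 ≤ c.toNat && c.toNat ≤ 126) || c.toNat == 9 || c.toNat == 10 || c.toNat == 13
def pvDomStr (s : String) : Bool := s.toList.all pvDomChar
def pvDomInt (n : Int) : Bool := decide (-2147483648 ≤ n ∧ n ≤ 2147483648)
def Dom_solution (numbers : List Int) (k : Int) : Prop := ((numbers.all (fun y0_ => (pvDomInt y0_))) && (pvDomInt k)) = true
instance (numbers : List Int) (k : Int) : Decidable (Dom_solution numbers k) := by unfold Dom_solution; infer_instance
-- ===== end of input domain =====

-- B replaces A's O(k) step-by-step wrap-around walk with the closed-form index (2*(k-1)) % len(numbers) (O(1)).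

-- ===== PORT A =====
-- while k > 0: k -= 1; i += 2; if i == leng: i = 0
def solutionLoopEven (leng k i : Int) : Int :=
  if _h : k > 0 then
    let i' := i + 2
    solutionLoopEven leng (k - 1) (if i' = leng then 0 else i')
  else i
termination_by k.toNat
decreasing_by omega

-- while k > 1: k -= 1; i += 2; if i == leng: i = 0 elif i == leng + 1: i = 1
def solutionLoopOdd (leng k i : Int) : Int :=
  if _h : k > 1 then
    let i' := i + 2
    solutionLoopOdd leng (k - 1) (if i' = leng then 0 else if i' = leng + 1 then 1 else i')
  else i
termination_by k.toNat
decreasing_by omega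

-- leng = len(numbers) inlined at its use sites
def solution (numbers : List Int) (k : Int) : Int :=
  if PySem.Int.mod (numbers.length : Int) 2 = 0 then
    (PySem.List.pyGet? numbers (solutionLoopEven (numbers.length : Int) (k - 1) 0)).getD 0
  else
    (PySem.List.pyGet? numbers (solutionLoopOdd (numbers.length : Int) k 0)).getD 0

-- ===== PORT B =====
def solution_alt (numbers : List Int) (k : Int) : Int :=
  (PySem.List.pyGet? numbers (PySem.Int.mod (2 * (k - 1)) numbers.length)).getD 0

-- ===== PRECONDITION & SPEC =====
-- Pre_ excludes: the empty list (A raises IndexError); singleton lists with k ≥ 2 (A's odd-length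
-- loop walks the index past the end and numbers[i] raises IndexError); and k ≤ 0, outside the
-- natural domain of a throw count, where A's return of numbers[0] is just the loop never running.
def Pre_solution (numbers : List Int) (k : Int) : Prop :=
  numbers ≠ [] ∧ 1 ≤ k ∧ (2 ≤ numbers.length ∨ k = 1)
instance (numbers : List Int) (k : Int) : Decidable (Pre_solution numbers k) := by
  unfold Pre_solution; infer_instance
def pvWitness_solution : List Int × Int := ([10, 20, 30, 40], 3)

-- On singleton lists with k ≥ 2 A's odd-length loop drives the index past the end and numbers[i]
-- raises IndexError, while B returns numbers[0] (the only ball holder).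
def Raises_solution (numbers : List Int) (k : Int) : Prop := numbers.length = 1 ∧ 2 ≤ k
instance (numbers : List Int) (k : Int) : Decidable (Raises_solution numbers k) := by
  unfold Raises_solution; infer_instance
def pvRaiseWitness_solution : List Int × Int := ([5], 2)
def pvRaiseWitnessOut_solution : Int := 5

def Spec_solution (numbers : List Int) (k : Int) (out : Int) : Prop := out = solution_alt numbers k
instance (numbers : List Int) (k : Int) (out : Int) : Decidable (Spec_solution numbers k out) := by unfold Spec_solution; infer_instance

-- ===== CLAIM (what is proved, stated in full; the proofs are below) =====
def Claim_equal_solution : Prop := ∀ (numbers : List Int) (k : Int), Dom_solution numbers k → Pre_solution numbers k → Spec_solution numbers k (solution numbers k)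
def Claim_raises_solution : Prop := (∀ (numbers : List Int) (k : Int), Dom_solution numbers k → Raises_solution numbers k → ¬ Pre_solution numbers k) ∧ (Dom_solution (pvRaiseWitness_solution.1) (pvRaiseWitness_solution.2) ∧ Raises_solution (pvRaiseWitness_solution.1) (pvRaiseWitness_solution.2) ∧ solution_alt (pvRaiseWitness_solution.1) (pvRaiseWitness_solution.2) = pvRaiseWitnessOut_solution)

-- ===== LEMMAS AND PROOFS =====

theorem loopEven_eq (leng : Int) (hpos : 0 < leng) (he : leng % 2 = 0) (k : Int) :
    ∀ i : Int, 0 ≤ i → i < leng → i % 2 = 0 →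
      solutionLoopEven leng k i = (i + 2 * max k 0) % leng := by
  suffices h : ∀ (n : Nat) (k : Int), k.toNat = n → ∀ i : Int, 0 ≤ i → i < leng → i % 2 = 0 →
      solutionLoopEven leng k i = (i + 2 * max k 0) % leng from
    fun i => h k.toNat k rfl i
  intro n
  induction n with
  | zero =>
    intro k hn i h0 hl h2
    rw [solutionLoopEven, dif_neg (by omega : ¬ k > 0)]
    have : max k 0 = 0 := by omega
    rw [this]; simp only [mul_zero, add_zero]; exact (Int.emod_eq_of_lt h0 (by omega)).symm
  | succ n ih =>
    intro k hn i h0 hl h2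
    by_cases hk : k > 0
    · rw [solutionLoopEven, dif_pos hk]
      show solutionLoopEven leng (k - 1) (if i + 2 = leng then 0 else i + 2) = _
      have hwrap : i + 2 ≤ leng := by omega
      by_cases hc : i + 2 = leng
      · rw [if_pos hc, ih (k - 1) (by omega) 0 le_rfl hpos (by omega)]
        have : (0 : Int) + 2 * max (k - 1) 0 = (i + 2 * max k 0) - leng := by omega
        rw [this, Int.sub_emod_right]
      · rw [if_neg hc, ih (k - 1) (by omega) (i + 2) (by omega) (by omega) (by omega)]
        congr 1; omega
    · rw [solutionLoopEven, dif_neg hk]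
      have : max k 0 = 0 := by omega
      rw [this]; simp only [mul_zero, add_zero]; exact (Int.emod_eq_of_lt h0 (by omega)).symm

theorem loopOdd_eq (leng : Int) (hpos : 3 ≤ leng) (k : Int) :
    ∀ i : Int, 0 ≤ i → i < leng →
      solutionLoopOdd leng k i = (i + 2 * max (k - 1) 0) % leng := by
  suffices h : ∀ (n : Nat) (k : Int), k.toNat = n → ∀ i : Int, 0 ≤ i → i < leng →
      solutionLoopOdd leng k i = (i + 2 * max (k - 1) 0) % leng from
    fun i => h k.toNat k rfl i
  intro n
  induction n with
  | zero =>
    intro k hn i h0 hl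
    rw [solutionLoopOdd, dif_neg (by omega : ¬ k > 1)]
    have : max (k - 1) 0 = 0 := by omega
    rw [this]; simp only [mul_zero, add_zero]; exact (Int.emod_eq_of_lt h0 (by omega)).symm
  | succ n ih =>
    intro k hn i h0 hl
    by_cases hk : k > 1
    · rw [solutionLoopOdd, dif_pos hk]
      show solutionLoopOdd leng (k - 1)
        (if i + 2 = leng then 0 else if i + 2 = leng + 1 then 1 else i + 2) = _
      by_cases hc : i + 2 = leng
      · rw [if_pos hc, ih (k - 1) (by omega) 0 le_rfl (by omega)]
        have : (0 : Int) + 2 * max (k - 1 - 1) 0 = (i + 2 * max (k - 1) 0) - leng := by omega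
        rw [this, Int.sub_emod_right]
      · by_cases hc1 : i + 2 = leng + 1
        · rw [if_neg hc, if_pos hc1, ih (k - 1) (by omega) 1 (by omega) (by omega)]
          have : (1 : Int) + 2 * max (k - 1 - 1) 0 = (i + 2 * max (k - 1) 0) - leng := by omega
          rw [this, Int.sub_emod_right]
        · rw [if_neg hc, if_neg hc1, ih (k - 1) (by omega) (i + 2) (by omega) (by omega)]
          congr 1; omega
    · rw [solutionLoopOdd, dif_neg hk]
      have : max (k - 1) 0 = 0 := by omega
      rw [this]; simp only [mul_zero, add_zero]; exact (Int.emod_eq_of_lt h0 (by omega)).symm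

-- ===== VERDICT (by name: the statement is the Claim_ definition above) =====
theorem solution_spec : Claim_equal_solution := by
  intro numbers k _ hpre
  obtain ⟨hne, hk, hlen⟩ := hpre
  have hlpos : 0 < (numbers.length : Int) := by
    simpa using List.length_pos_iff.mpr hne
  unfold Spec_solution solution solution_alt
  rw [PySem.Int.mod_eq_emod_of_pos hlpos,
      PySem.Int.mod_eq_emod_of_pos (by omega : (0:Int) < 2)]
  by_cases he : (numbers.length : Int) % 2 = 0
  · rw [if_pos he, loopEven_eq _ hlpos he (k - 1) 0 le_rfl hlpos (by omega),
        (by omega : (0:Int) + 2 * max (k - 1) 0 = 2 * (k - 1))]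
  · rw [if_neg he]
    rcases hlen with h2 | h1
    · have h3 : (3 : Int) ≤ (numbers.length : Int) := by
        have := Int.emod_two_eq (numbers.length : Int)
        omega
      rw [loopOdd_eq _ h3 k 0 le_rfl (by omega),
          (by omega : (0:Int) + 2 * max (k - 1) 0 = 2 * (k - 1))]
    · subst h1
      rw [solutionLoopOdd, dif_neg (by omega : ¬ (1:Int) > 1)]
      norm_num

@[simp] theorem solution_raises : Claim_raises_solution := by
  unfold Claim_raises_solution
  refine ⟨?_, by decide, by decide, by decide⟩
  intro numbers k _ hr hp
  obtain ⟨h1, h2⟩ := hr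
  obtain ⟨_, _, hlen⟩ := hp
  omega
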